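-- pv_equiv track=rewrite | github.com/Najeong-Kim/codetree-TILs | 241116/100으로 나눈 나머지의 수열/sequence-of-remainder-divided-by-100.py | function
-- ===== SOURCE A (Python) =====
-- def function(n):
--     if n <= 0:
--         return 1
--     if n == 1:
--         return 2
--     if n == 2:
--         return 4
--     return (function(n - 1) * function(n - 2)) % 100
-- ===== SOURCE B (Python) =====
-- def function(n):
--     if n <= 0:
--         return 1
--     if n == 1:
--         return 2
--     a, b = 2, 4  # f(1), f(2)
--     for _ in range(n - 2):
--         a, b = b, (a * b) % 100
--     return b
-- ===== Notes on version B (the rewrite author's own statement) =====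
-- stated objective: faster
-- what changed: Replaces the exponential double recursion with an iterative loop keeping only the last two values mod 100.
import Mathlib
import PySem

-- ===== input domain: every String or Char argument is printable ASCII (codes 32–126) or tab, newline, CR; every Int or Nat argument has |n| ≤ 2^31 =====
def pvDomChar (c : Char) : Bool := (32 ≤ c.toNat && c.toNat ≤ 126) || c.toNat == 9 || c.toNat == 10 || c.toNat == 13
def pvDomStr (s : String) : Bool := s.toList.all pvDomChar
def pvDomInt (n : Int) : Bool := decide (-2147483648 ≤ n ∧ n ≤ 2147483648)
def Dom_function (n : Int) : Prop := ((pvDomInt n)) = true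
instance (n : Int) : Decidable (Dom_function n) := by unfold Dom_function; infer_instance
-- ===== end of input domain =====

-- B replaces A's exponential double recursion by an iterative loop over the last two values mod 100 (asymptotically faster).


-- ===== PORT A =====
def function (n : Int) : Int :=
  if n ≤ 0 then 1
  else if n = 1 then 2
  else if n = 2 then 4
  else PySem.Int.mod (function (n - 1) * function (n - 2)) 100
termination_by n.toNat
decreasing_by all_goals omega

-- ===== PORT B =====
def function_alt (n : Int) : Int :=
  if n ≤ 0 then 1
  else if n = 1 then 2
  else
    ((List.range (n - 2).toNat).foldl
      (fun (p : Int × Int) _ => (p.2, PySem.Int.mod (p.1 * p.2) 100)) (2, 4)).2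

-- ===== PRECONDITION & SPEC =====
-- A recurses with depth n, so for large n Python A raises RecursionError (default limit ~1000);
-- Pre_ keeps n at most 900, safely below the limit -- exactly the narrowing needed to exclude those raising inputs.
def Pre_function (n : Int) : Prop := n <= 900
instance (n : Int) : Decidable (Pre_function n) := by unfold Pre_function; infer_instance
def pvWitness_function : Int := 5
def Spec_function (n : Int) (out : Int) : Prop := out = function_alt n
instance (n : Int) (out : Int) : Decidable (Spec_function n out) := by unfold Spec_function; infer_instance

-- ===== CLAIM (what is proved, stated in full; the proofs are below) =====
def Claim_equal_function : Prop := ∀ (n : Int), Dom_function n → Pre_function n → Spec_function n (function n)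

-- ===== LEMMAS AND PROOFS =====

-- Unfolding A's recursion at n ≥ 3.
theorem function_rec (n : Int) (h : 3 ≤ n) :
    function n = PySem.Int.mod (function (n - 1) * function (n - 2)) 100 := by
  rw [function]
  simp only [if_neg (by omega : ¬ n ≤ 0), if_neg (by omega : n ≠ 1), if_neg (by omega : n ≠ 2)]

-- Loop invariant: after k iterations the pair holds (A (k+1), A (k+2)).
theorem loop_inv (k : Nat) :
    (List.range k).foldl
      (fun (p : Int × Int) _ => (p.2, PySem.Int.mod (p.1 * p.2) 100)) (2, 4)
    = (function ((k : Int) + 1), function ((k : Int) + 2)) := by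
  induction k with
  | zero =>
    simp [List.range_zero]
    constructor
    · rw [function]; norm_num
    · rw [function]; norm_num
  | succ k ih =>
    rw [List.range_succ, List.foldl_append, ih]
    simp only [List.foldl_cons, List.foldl_nil]
    have h1 : ((k + 1 : Nat) : Int) + 1 = (k : Int) + 2 := by push_cast; ring
    have h2 : ((k + 1 : Nat) : Int) + 2 = (k : Int) + 3 := by push_cast; ring
    rw [h1, h2, function_rec ((k : Int) + 3) (by omega)]
    norm_num
    ring_nf

-- ===== VERDICT (by name: the statement is the Claim_ definition above) =====
theorem function_spec : Claim_equal_function := by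
  intro n _ _
  unfold Spec_function function_alt
  by_cases h0 : n ≤ 0
  · rw [if_pos h0, function, if_pos h0]
  · rw [if_neg h0]
    by_cases h1 : n = 1
    · rw [if_pos h1, h1, function]; norm_num
    · rw [if_neg h1, loop_inv]
      have : ((n - 2).toNat : Int) + 2 = n ∨ n = 2 := by omega
      rcases this with h | h
      · rw [show ((n-2).toNat : Int) + 2 = n from h]
      · subst h
        show _ = function (((0:Nat) : Int) + 2)
        norm_num
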